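-- pv_equiv track=rewrite | github.com/Derecichei/ISCIENCE-D-26-00600 | Leucine_Serine_V4.py | classify_and_count_codons
-- ===== SOURCE A (Python) =====
-- def classify_and_count_codons(nucleotide_seq, codons, classifications):
--     codon_counts = {key: 0 for key in classifications.keys()}
--     total_count = 0
--     for i in range(0, len(nucleotide_seq) - 2, 3):
--         codon = nucleotide_seq[i:i + 3]
--         if codon in codons:
--             total_count += 1
--             for classification, codon_list in classifications.items():
--                 if codon in codon_list:
--                     codon_counts[classification] += 1
--     return total_count, codon_counts
-- ===== SOURCE B (Python) =====
-- def classify_and_count_codons(nucleotide_seq, codons, classifications):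
--     # Build a frequency table of the in-frame codons once, then summarize it.
--     freq = {}
--     for i in range(0, len(nucleotide_seq) - 2, 3):
--         c = nucleotide_seq[i:i + 3]
--         freq[c] = freq.get(c, 0) + 1
--     codon_set = set(codons)
--     total_count = sum(n for c, n in freq.items() if c in codon_set)
--     codon_counts = {cls: sum(freq.get(c, 0) for c in set(lst) if c in codon_set)
--                     for cls, lst in classifications.items()}
--     return total_count, codon_counts
-- ===== Notes on version B (the rewrite author's own statement) =====
-- stated objective: faster
-- what changed: Instead of testing every in-frame codon against the codons list and every classification list per position, B builds a frequency table of the in-frame codons in one pass and then sums frequencies per codon set and per classification, with set/dict lookups replacing the inner list scans.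
import Mathlib
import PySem

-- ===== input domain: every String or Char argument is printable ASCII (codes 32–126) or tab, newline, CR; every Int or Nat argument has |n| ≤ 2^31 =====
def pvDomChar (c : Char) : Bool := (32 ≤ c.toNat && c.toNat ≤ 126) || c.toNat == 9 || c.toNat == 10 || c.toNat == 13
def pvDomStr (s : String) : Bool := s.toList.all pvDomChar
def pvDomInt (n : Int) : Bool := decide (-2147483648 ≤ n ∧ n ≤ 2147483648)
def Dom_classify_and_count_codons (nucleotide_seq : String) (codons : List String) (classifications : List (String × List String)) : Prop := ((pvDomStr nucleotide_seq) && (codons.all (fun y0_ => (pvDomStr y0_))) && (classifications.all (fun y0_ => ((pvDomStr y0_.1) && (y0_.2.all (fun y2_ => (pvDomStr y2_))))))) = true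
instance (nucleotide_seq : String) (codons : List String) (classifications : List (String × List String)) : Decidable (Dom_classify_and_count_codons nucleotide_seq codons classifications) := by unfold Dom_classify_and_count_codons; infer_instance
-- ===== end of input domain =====

-- B replaces A's per-position scan of codons and of every classification list by one frequency
-- table of the in-frame codons that is then summarized per classification (alternative algorithm).

-- ===== PORT A =====
-- 'classifications' is a Python dict; per the type convention it arrives as an association list
-- and is materialized as the dict PySem.Dict.ofList classifications (duplicate keys collapse
-- exactly as a Python dict literal would). The returned dict is its items list.
def classify_and_count_codons (nucleotide_seq : String) (codons : List String) (classifications : List (String × List String)) : Int × (List (String × Int)) :=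
  let cls : PySem.Dict String (List String) := PySem.Dict.ofList classifications
  let codon_counts : PySem.Dict String Int :=
    cls.keys.foldl (fun d key => d.insert key 0) PySem.Dict.empty
  let res :=
    (PySem.List.pyRange 0 (PySem.Str.len nucleotide_seq - 2) 3).foldl
      (fun (acc : Int × PySem.Dict String Int) i =>
        let codon := PySem.Str.slice nucleotide_seq (some i) (some (i + 3))
        if codon ∈ codons then
          (acc.1 + 1,
           cls.items.foldl
             (fun d p => if codon ∈ p.2 then d.modify p.1 0 (· + 1) else d) acc.2)
        else acc)
      ((0 : Int), codon_counts)
  (res.1, res.2.items)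

-- ===== PORT B =====
def classify_and_count_codons_alt (nucleotide_seq : String) (codons : List String) (classifications : List (String × List String)) : Int × (List (String × Int)) :=
  let cls : PySem.Dict String (List String) := PySem.Dict.ofList classifications
  let freq : PySem.Dict String Int :=
    (PySem.List.pyRange 0 (PySem.Str.len nucleotide_seq - 2) 3).foldl
      (fun d i =>
        let c := PySem.Str.slice nucleotide_seq (some i) (some (i + 3))
        d.insert c (d.getD c 0 + 1))
      PySem.Dict.empty
  let codon_set : PySem.Set String := PySem.Set.ofList codons
  let total_count : Int :=
    (freq.items.filter (fun p => PySem.Set.contains codon_set p.1)).foldl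
      (fun a p => a + p.2) 0
  let codon_counts : List (String × Int) :=
    cls.items.map (fun q =>
      (q.1,
       ((PySem.Set.ofList q.2).filter (fun c => PySem.Set.contains codon_set c)).foldl
         (fun a c => a + freq.getD c 0) 0))
  (total_count, codon_counts)

-- ===== PRECONDITION & SPEC =====
def Spec_classify_and_count_codons (nucleotide_seq : String) (codons : List String) (classifications : List (String × List String)) (out : Int × (List (String × Int))) : Prop := out = classify_and_count_codons_alt nucleotide_seq codons classifications
instance (nucleotide_seq : String) (codons : List String) (classifications : List (String × List String)) (out : Int × (List (String × Int))) : Decidable (Spec_classify_and_count_codons nucleotide_seq codons classifications out) := by unfold Spec_classify_and_count_codons; infer_instance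

-- ===== CLAIM (what is proved, stated in full; the proofs are below) =====
def Claim_equal_classify_and_count_codons : Prop := ∀ (nucleotide_seq : String) (codons : List String) (classifications : List (String × List String)), Dom_classify_and_count_codons nucleotide_seq codons classifications → Spec_classify_and_count_codons nucleotide_seq codons classifications (classify_and_count_codons nucleotide_seq codons classifications)

-- ===== LEMMAS AND PROOFS =====

theorem pv_sum_indicator_of_not_mem (S : List String) (a : String) (ha : a ∉ S) :
    (S.map (fun k => if k = a then (1 : Int) else 0)).sum = 0 := by
  induction S with
  | nil => simp
  | cons s S' ih =>
    simp only [List.map_cons, List.sum_cons]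
    rw [if_neg (by rintro rfl; exact ha (List.mem_cons_self)), ih (fun h => ha (List.mem_cons_of_mem _ h))]
    simp

theorem pv_sum_indicator (S : List String) (a : String) (hnd : S.Nodup) :
    (S.map (fun k => if k = a then (1 : Int) else 0)).sum = if a ∈ S then 1 else 0 := by
  induction S with
  | nil => simp
  | cons s S' ih =>
    simp only [List.map_cons, List.sum_cons]
    rcases List.nodup_cons.mp hnd with ⟨hs, hnd'⟩
    by_cases h : s = a
    · subst h
      rw [if_pos rfl, pv_sum_indicator_of_not_mem S' s hs]
      simp
    · rw [if_neg h, ih hnd']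
      have : (a ∈ s :: S') ↔ (a ∈ S') := by
        constructor
        · intro hm; rcases List.mem_cons.mp hm with rfl | hm
          · exact absurd rfl h
          · exact hm
        · exact List.mem_cons_of_mem _
      by_cases hm : a ∈ S' <;> simp [hm, this]

theorem pv_map_count_cons (S : List String) (a : String) (t : List String) :
    (S.map (fun k => ((a :: t).count k : Int))).sum
      = (S.map (fun k => (t.count k : Int))).sum
        + (S.map (fun k => if k = a then (1 : Int) else 0)).sum := by
  induction S with
  | nil => simp
  | cons s S' ih =>
    simp only [List.map_cons, List.sum_cons, ih]
    by_cases h : s = a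
    · subst h; simp [List.count_cons]; push_cast; ring
    · have : (a :: t).count s = t.count s := by
        simp [List.count_cons, h]
        exact fun h2 => h h2.symm
      rw [this, if_neg h]
      ring

-- sum of per-element counts over a duplicate-free index list S equals countP, when S consists
-- exactly of the p-satisfying candidates
theorem pv_sum_count_eq_countP (L S : List String) (p : String → Bool)
    (hnd : S.Nodup) (h1 : ∀ x ∈ L, p x = true → x ∈ S) (h2 : ∀ x ∈ S, p x = true) :
    (S.map (fun k => (L.count k : Int))).sum = (L.countP p : Int) := by
  induction L with
  | nil => simp
  | cons a t ih =>
    rw [pv_map_count_cons, pv_sum_indicator S a hnd,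
        ih (fun x hx hp => h1 x (List.mem_cons_of_mem _ hx) hp)]
    have hmem : (a ∈ S) ↔ (p a = true) := by
      constructor
      · exact h2 a
      · intro hp; exact h1 a List.mem_cons_self hp
    by_cases hp : p a = true
    · rw [if_pos (hmem.mpr hp)]
      simp [List.countP_cons, hp]
    · rw [if_neg (fun hm => hp (hmem.mp hm))]
      simp [List.countP_cons, hp]

-- the inner classification loop of A: keys are preserved
theorem pv_inner_keys (codon : String) (itemsC : List (String × List String)) :
    ∀ d : PySem.Dict String Int, (∀ p ∈ itemsC, d.contains p.1 = true) →
      (List.foldl (fun d p => if codon ∈ p.2 then d.modify p.1 0 (· + 1) else d) d itemsC).keys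
        = d.keys := by
  induction itemsC with
  | nil => intro d _; rfl
  | cons p rest ih =>
    intro d hc
    simp only [List.foldl_cons]
    have hkeys : (if codon ∈ p.2 then d.modify p.1 0 (· + 1) else d).keys = d.keys := by
      split
      · rw [PySem.Dict.keys_modify, PySem.Dict.keys_insert_of_contains _ _ (hc p List.mem_cons_self)]
      · rfl
    rw [ih _ (fun q hq => by
      rw [show ((if codon ∈ p.2 then d.modify p.1 0 (· + 1) else d).contains q.1)
            = decide (q.1 ∈ (if codon ∈ p.2 then d.modify p.1 0 (· + 1) else d).keys) from ?_]
      · rw [hkeys]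
        have := (PySem.Dict.contains_iff_mem_keys d q.1).mp (hc q (List.mem_cons_of_mem _ hq))
        simp [this]
      · by_cases hcq : (if codon ∈ p.2 then d.modify p.1 0 (· + 1) else d).contains q.1 = true
        · simp [hcq, (PySem.Dict.contains_iff_mem_keys _ _).mp hcq]
        · simp only [Bool.not_eq_true] at hcq
          simp [hcq]
          intro hmem
          exact absurd ((PySem.Dict.contains_iff_mem_keys _ _).mpr hmem) (by simp [hcq])), hkeys]

theorem pv_inner_getD_of_not_mem (codon k : String) (itemsC : List (String × List String))
    (hk : k ∉ itemsC.map Prod.fst) :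
    ∀ d : PySem.Dict String Int,
      (List.foldl (fun d p => if codon ∈ p.2 then d.modify p.1 0 (· + 1) else d) d itemsC).getD k 0
        = d.getD k 0 := by
  induction itemsC with
  | nil => intro d; rfl
  | cons p rest ih =>
    intro d
    simp only [List.map_cons, List.mem_cons, not_or] at hk
    simp only [List.foldl_cons]
    rw [ih hk.2]
    split
    · exact PySem.Dict.getD_modify_of_ne d 0 _ hk.1
    · rfl

theorem pv_inner_getD (codon k : String) (lst : List String) (itemsC : List (String × List String))
    (hnd : (itemsC.map Prod.fst).Nodup) (hmem : (k, lst) ∈ itemsC) :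
    ∀ d : PySem.Dict String Int,
      (List.foldl (fun d p => if codon ∈ p.2 then d.modify p.1 0 (· + 1) else d) d itemsC).getD k 0
        = d.getD k 0 + (if codon ∈ lst then (1 : Int) else 0) := by
  induction itemsC with
  | nil => exact absurd hmem (List.not_mem_nil)
  | cons p rest ih =>
    intro d
    simp only [List.map_cons, List.nodup_cons] at hnd
    simp only [List.foldl_cons]
    rcases List.mem_cons.mp hmem with heq | hmem'
    · -- head is (k, lst); k does not occur in rest
      have hk : k ∉ rest.map Prod.fst := by rw [show k = p.1 from by rw [← heq]]; exact hnd.1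
      rw [pv_inner_getD_of_not_mem codon k rest hk]
      rw [← heq]
      split
      · rw [PySem.Dict.getD_modify_self]
      · simp
    · -- head key differs from k
      have hne : k ≠ p.1 := by
        intro h
        exact hnd.1 (List.mem_map.mpr ⟨(k, lst), hmem', h⟩)
      rw [ih hnd.2 hmem']
      congr 1
      split
      · exact PySem.Dict.getD_modify_of_ne d 0 _ hne
      · rfl

-- the outer loop of A over the list of in-frame codons
theorem pv_outer (codons : List String) (itemsC : List (String × List String))
    (hnd : (itemsC.map Prod.fst).Nodup) :
    ∀ (L : List String) (t : Int) (d : PySem.Dict String Int),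
      (∀ p ∈ itemsC, d.contains p.1 = true) →
      (List.foldl
          (fun (acc : Int × PySem.Dict String Int) x =>
            if x ∈ codons then
              (acc.1 + 1,
               List.foldl (fun d p => if x ∈ p.2 then d.modify p.1 0 (· + 1) else d) acc.2 itemsC)
            else acc) (t, d) L).1
        = t + (L.countP (fun x => decide (x ∈ codons)) : Int)
      ∧ (List.foldl
          (fun (acc : Int × PySem.Dict String Int) x =>
            if x ∈ codons then
              (acc.1 + 1,
               List.foldl (fun d p => if x ∈ p.2 then d.modify p.1 0 (· + 1) else d) acc.2 itemsC)
            else acc) (t, d) L).2.keys = d.keys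
      ∧ ∀ k lst, (k, lst) ∈ itemsC →
          (List.foldl
            (fun (acc : Int × PySem.Dict String Int) x =>
              if x ∈ codons then
                (acc.1 + 1,
                 List.foldl (fun d p => if x ∈ p.2 then d.modify p.1 0 (· + 1) else d) acc.2 itemsC)
              else acc) (t, d) L).2.getD k 0
            = d.getD k 0 + (L.countP (fun x => decide (x ∈ codons) && decide (x ∈ lst)) : Int) := by
  intro L
  induction L with
  | nil => intro t d _; refine ⟨by simp, rfl, fun k lst _ => by simp⟩
  | cons x L' ih =>
    intro t d hc
    by_cases hx : x ∈ codons
    · have hc' : ∀ p ∈ itemsC,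
          (List.foldl (fun (d : PySem.Dict String Int) (p : String × List String) => if x ∈ p.2 then d.modify p.1 0 (· + 1) else d) d itemsC).contains p.1 = true := by
        intro p hp
        have hkeys := pv_inner_keys x itemsC d hc
        refine (PySem.Dict.contains_iff_mem_keys _ _).mpr ?_
        rw [hkeys]
        exact (PySem.Dict.contains_iff_mem_keys d p.1).mp (hc p hp)
      obtain ⟨ih1, ih2, ih3⟩ := ih (t + 1)
        (List.foldl (fun (d : PySem.Dict String Int) (p : String × List String) => if x ∈ p.2 then d.modify p.1 0 (· + 1) else d) d itemsC) hc'
      refine ⟨?_, ?_, ?_⟩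
      · simp only [List.foldl_cons, if_pos hx]
        rw [ih1]
        simp [List.countP_cons, hx]
        push_cast
        ring
      · simp only [List.foldl_cons, if_pos hx]
        rw [ih2, pv_inner_keys x itemsC d hc]
      · intro k lst hm
        simp only [List.foldl_cons, if_pos hx]
        rw [ih3 k lst hm, pv_inner_getD x k lst itemsC hnd hm d]
        simp [List.countP_cons, hx]
        by_cases hl : x ∈ lst <;> simp [hl] <;> push_cast <;> ring
    · obtain ⟨ih1, ih2, ih3⟩ := ih t d hc
      refine ⟨?_, ?_, ?_⟩
      · simp only [List.foldl_cons, if_neg hx]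
        rw [ih1]
        simp [List.countP_cons, hx]
      · simp only [List.foldl_cons, if_neg hx]
        exact ih2
      · intro k lst hm
        simp only [List.foldl_cons, if_neg hx]
        rw [ih3 k lst hm]
        simp [List.countP_cons, hx]

theorem classify_and_count_codons_spec : Claim_equal_classify_and_count_codons := by
  intro s codons classifications _
  unfold Spec_classify_and_count_codons classify_and_count_codons classify_and_count_codons_alt
  simp only []
  set cls : PySem.Dict String (List String) := PySem.Dict.ofList classifications with hcls
  set R : List Int := PySem.List.pyRange 0 (PySem.Str.len s - 2) 3 with hR
  set L : List String := R.map (fun i => PySem.Str.slice s (some i) (some (i + 3))) with hL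
  set d0 : PySem.Dict String Int := cls.keys.foldl (fun d key => d.insert key 0) PySem.Dict.empty with hd0
  -- facts about the zero-initialized counts dict
  have hnodk : cls.keys.Nodup := PySem.Dict.nodup_keys_ofList _
  have hitems0 : d0.items = cls.keys.map (fun k => (k, (0 : Int))) := by
    have h := PySem.Dict.items_foldl_insert_fresh cls.keys (fun k => k) (fun _ => (0 : Int))
      PySem.Dict.empty (fun a _ => PySem.Dict.contains_empty a) (by simpa using hnodk)
    simpa using h
  have hkeys0 : d0.keys = cls.keys := by
    show d0.items.map Prod.fst = cls.keys
    rw [hitems0]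
    rw [List.map_map]
    exact (List.map_congr_left fun k _ => rfl).trans (List.map_id _)
  have hc0 : ∀ p ∈ cls.items, d0.contains p.1 = true := by
    intro p hp
    refine (PySem.Dict.contains_iff_mem_keys _ _).mpr ?_
    rw [hkeys0]
    exact List.mem_map.mpr ⟨p, hp, rfl⟩
  have hgetD0 : ∀ p ∈ cls.items, d0.getD p.1 0 = 0 := by
    intro p hp
    refine PySem.Dict.getD_of_mem_items _ ?_ (by rw [hkeys0]; exact hnodk) 0
    rw [hitems0]
    exact List.mem_map.mpr ⟨p.1, List.mem_map.mpr ⟨p, hp, rfl⟩, rfl⟩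
  have hndItems : (cls.items.map Prod.fst).Nodup := hnodk
  -- A's outer fold, as a fold over the in-frame codon list L
  have hAfold : (R.foldl (fun (acc : Int × PySem.Dict String Int) i =>
        let codon := PySem.Str.slice s (some i) (some (i + 3))
        if codon ∈ codons then
          (acc.1 + 1,
           cls.items.foldl (fun d p => if codon ∈ p.2 then d.modify p.1 0 (· + 1) else d) acc.2)
        else acc) ((0 : Int), d0))
      = (L.foldl (fun (acc : Int × PySem.Dict String Int) x =>
          if x ∈ codons then
            (acc.1 + 1,
             List.foldl (fun d p => if x ∈ p.2 then d.modify p.1 0 (· + 1) else d) acc.2 cls.items)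
          else acc) ((0 : Int), d0)) := by
    rw [hL, List.foldl_map]
  obtain ⟨hA1, hA2, hA3⟩ := pv_outer codons cls.items hndItems L 0 d0 hc0
  -- B's frequency dict is the counter of L
  have hBfreq : (R.foldl (fun (d : PySem.Dict String Int) i =>
        let c := PySem.Str.slice s (some i) (some (i + 3))
        d.insert c (d.getD c 0 + 1)) PySem.Dict.empty) = PySem.Dict.counter L := by
    rw [hL, ← PySem.Dict.foldl_insert_getD_add_one_eq_counter, List.foldl_map]
  rw [hAfold, hBfreq]
  -- name A's final state
  set F := (L.foldl (fun (acc : Int × PySem.Dict String Int) x =>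
      if x ∈ codons then
        (acc.1 + 1,
         List.foldl (fun d p => if x ∈ p.2 then d.modify p.1 0 (· + 1) else d) acc.2 cls.items)
      else acc) ((0 : Int), d0)) with hF
  have hcont : ∀ x : String, PySem.Set.contains (PySem.Set.ofList codons) x = decide (x ∈ codons) := by
    intro x
    simp [PySem.Set.contains, PySem.Set.mem_ofList]
  refine Prod.ext ?_ ?_
  · -- total counts agree
    rw [hA1]
    rw [PySem.Dict.items_counter, List.filter_map, PySem.List.foldl_add]
    simp only [List.map_map]
    have hsum := pv_sum_count_eq_countP L
      ((PySem.Set.ofList L).filter (fun k => decide (k ∈ codons)))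
      (fun x => decide (x ∈ codons))
      (List.Nodup.filter _ (PySem.Set.nodup_ofList L))
      (fun x hx hp => List.mem_filter.mpr ⟨(PySem.Set.mem_ofList L x).mpr hx, hp⟩)
      (fun x hx => (List.mem_filter.mp hx).2)
    calc (0 : Int) + 0 + ↑(List.countP (fun x => decide (x ∈ codons)) L)
        = ↑(List.countP (fun x => decide (x ∈ codons)) L) := by ring
      _ = (((PySem.Set.ofList L).filter (fun k => decide (k ∈ codons))).map
            (fun k => (L.count k : Int))).sum := hsum.symm
      _ = 0 + (((PySem.Set.ofList L).filter
            (fun p => PySem.Set.contains (PySem.Set.ofList codons) p)).map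
            ((fun (p : String × Int) => p.2) ∘ (fun k => (k, (L.count k : Int))))).sum := by
          simp only [hcont]
          simp
          rfl
  · -- per-classification counts agree
    have hkeysF : F.2.keys = cls.keys := by rw [hA2, hkeys0]
    have hitemsF : F.2.items = F.2.keys.map (fun k => (k, F.2.getD k 0)) :=
      PySem.Dict.items_eq_map_keys F.2 (by rw [hkeysF]; exact hnodk) 0
    rw [hitemsF, hkeysF]
    rw [show cls.keys = cls.items.map Prod.fst from rfl, List.map_map]
    refine List.map_congr_left ?_
    intro p hp
    have hv := hA3 p.1 p.2 (by simpa using hp)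
    simp only [Function.comp]
    rw [hv, hgetD0 p hp]
    have hsum := pv_sum_count_eq_countP L
      ((PySem.Set.ofList p.2).filter (fun c => decide (c ∈ codons)))
      (fun x => decide (x ∈ codons) && decide (x ∈ p.2))
      (List.Nodup.filter _ (PySem.Set.nodup_ofList p.2))
      (fun x _ hpx => by
        rcases Bool.and_eq_true_iff.mp hpx with ⟨h1, h2⟩
        exact List.mem_filter.mpr ⟨(PySem.Set.mem_ofList p.2 x).mpr (of_decide_eq_true h2), h1⟩)
      (fun x hx => by
        rcases List.mem_filter.mp hx with ⟨hm, hcod⟩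
        exact Bool.and_eq_true_iff.mpr ⟨hcod, decide_eq_true ((PySem.Set.mem_ofList p.2 x).mp hm)⟩)
    refine Prod.ext rfl ?_
    show (0 : Int) + ↑(List.countP (fun x => decide (x ∈ codons) && decide (x ∈ p.2)) L)
        = ((PySem.Set.ofList p.2).filter
            (fun c => PySem.Set.contains (PySem.Set.ofList codons) c)).foldl
            (fun a c => a + (PySem.Dict.counter L).getD c 0) 0
    rw [PySem.List.foldl_add]
    simp only [hcont, PySem.Dict.getD_counter]
    rw [← hsum]
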